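-- pv_equiv track=rewrite | github.com/pokerdio/generic | cf/cf1678c.py | go2
-- ===== SOURCE A (Python) =====
-- p0 = [5, 1, 6, 2, 8, 3, 4, 10, 9, 7]
--
-- n0 = len(p0)
--
-- def go2(n=n0, p=p0):
--     v = [[0] * n for _ in range(n)]
--     for b in range(0, n):
--         kount_smol = 0
--         for d in range(n - 1, b, -1):
--             if p[b] > p[d]:
--                 kount_smol += 1
--             v[b][d] = kount_smol
--
--     for b in range(1, n):
--         for x in range(n):
--             v[b][x] += v[b - 1][x]
--     ret = 0
--     for a in range(0, n - 3):
--         for c in range(a + 2, n - 1):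
--             if p[a] < p[c]:
--                 delta = v[c - 1][c + 1] - v[a][c + 1]
--                 if delta > 0:
--                     ret += delta
--     return ret
-- ===== SOURCE B (Python) =====
-- p0 = [5, 1, 6, 2, 8, 3, 4, 10, 9, 7]
--
-- n0 = len(p0)
--
-- def go2(n=n0, p=p0):
--     # pivot on the middle pair (b, c): total += left(b,c) * right(b,c)
--     total = 0
--     left = [0] * n  # left[j] = number of a < b with p[a] < p[j], maintained as b grows
--     for b in range(1, n - 1):
--         for j in range(n):
--             if p[b - 1] < p[j]:
--                 left[j] += 1
--         right = 0
--         for c in range(n - 2, b, -1):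
--             if p[c + 1] < p[b]:
--                 right += 1
--             total += left[c] * right
--     return total
-- ===== Notes on version B (the rewrite author's own statement) =====
-- stated objective: alternative
-- what changed: Instead of building an n x n suffix-count table, prefix-summing it over b and scanning pairs (a,c) with table differences, B pivots on the middle pair (b,c) and sums left(b,c)*right(b,c), maintaining one 1D array of 'smaller-prefix' counts and a scalar running 'right' counter, using O(n) instead of O(n^2) extra space.
import Mathlib
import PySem

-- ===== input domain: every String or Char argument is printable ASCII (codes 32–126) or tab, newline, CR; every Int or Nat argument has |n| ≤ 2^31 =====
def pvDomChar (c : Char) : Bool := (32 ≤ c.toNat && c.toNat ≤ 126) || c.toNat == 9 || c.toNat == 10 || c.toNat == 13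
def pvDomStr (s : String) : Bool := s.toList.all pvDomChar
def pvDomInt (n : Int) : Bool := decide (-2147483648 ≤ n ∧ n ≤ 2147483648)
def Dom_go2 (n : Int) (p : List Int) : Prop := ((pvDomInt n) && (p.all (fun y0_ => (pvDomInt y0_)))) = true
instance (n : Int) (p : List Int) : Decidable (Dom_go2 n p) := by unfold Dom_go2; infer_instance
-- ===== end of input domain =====

-- B replaces A's n×n suffix-count table (built, prefix-summed over b, read by an (a,c)-scan of
-- table differences) with a pivot on the middle pair (b,c): one 1D prefix-count array and a scalar
-- running counter; same value, same O(n^2) time, O(n) instead of O(n^2) extra space.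


-- ===== PORT A =====
-- first loop of A, one row b of v: for d in range(n-1, b, -1): kount_smol += …; v[b][d] = kount_smol
-- (rows are independent in this loop, so v is built as the list of per-b rows; all indices used are
-- nonnegative and in range on every admitted input)
def go2Row (n : Int) (p : List Int) (b : Int) : List Int :=
  ((PySem.List.pyRange (n-1) b (-1)).foldl
    (fun (st : Int × List Int) d =>
      let kount := if PySem.List.pyGetD p b 0 > PySem.List.pyGetD p d 0 then st.1 + 1 else st.1
      (kount, PySem.List.pySetD st.2 d kount))
    (0, List.replicate n.toNat 0)).2

-- second loop of A: for b in range(1, n): for x in range(n): v[b][x] += v[b-1][x]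
def go2Acc (n : Int) (v : List (List Int)) : List (List Int) :=
  (PySem.List.pyRange 1 n 1).foldl
    (fun v b =>
      (PySem.List.pyRange 0 n 1).foldl
        (fun v x =>
          PySem.List.pySetD v b
            (PySem.List.pySetD (PySem.List.pyGetD v b [])
              x (PySem.List.pyGetD (PySem.List.pyGetD v b []) x 0
                 + PySem.List.pyGetD (PySem.List.pyGetD v (b-1) []) x 0)))
        v)
    v

-- third loop of A: the (a, c) scan accumulating ret from differences of the prefix-summed table
def go2 (n : Int) (p : List Int) : Int :=
  let v := go2Acc n ((PySem.List.pyRange 0 n 1).map (go2Row n p))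
  (PySem.List.pyRange 0 (n-3) 1).foldl (fun ret a =>
    (PySem.List.pyRange (a+2) (n-1) 1).foldl (fun ret c =>
      if PySem.List.pyGetD p a 0 < PySem.List.pyGetD p c 0 then
        let delta := PySem.List.pyGetD (PySem.List.pyGetD v (c-1) []) (c+1) 0
                   - PySem.List.pyGetD (PySem.List.pyGetD v a []) (c+1) 0
        if delta > 0 then ret + delta else ret
      else ret) ret) 0

-- ===== PORT B =====
-- state (left, total); for each middle-left b: update left with p[b-1] (left[j] = #{a<b : p[a]<p[j]}),
-- then sweep c downward keeping the running counter right = #{d > c : p[d] < p[b]}, adding left[c]*right.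
def go2_alt (n : Int) (p : List Int) : Int :=
  ((PySem.List.pyRange 1 (n-1) 1).foldl
    (fun (st : List Int × Int) b =>
      let left := (PySem.List.pyRange 0 n 1).foldl
        (fun left j =>
          if PySem.List.pyGetD p (b-1) 0 < PySem.List.pyGetD p j 0 then
            PySem.List.pySetD left j (PySem.List.pyGetD left j 0 + 1)
          else left) st.1
      let inner := (PySem.List.pyRange (n-2) b (-1)).foldl
        (fun (rt : Int × Int) c =>
          let right := if PySem.List.pyGetD p (c+1) 0 < PySem.List.pyGetD p b 0 then rt.1 + 1 else rt.1
          (right, rt.2 + PySem.List.pyGetD left c 0 * right))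
        (0, st.2)
      (left, inner.2))
    (List.replicate n.toNat 0, 0)).2

-- ===== PRECONDITION & SPEC =====
-- Python A raises IndexError exactly when n ≥ 2 and n > len(p); it returns normally otherwise.
def Pre_go2 (n : Int) (p : List Int) : Prop := n ≤ 1 ∨ n ≤ (p.length : Int)
instance (n : Int) (p : List Int) : Decidable (Pre_go2 n p) := by unfold Pre_go2; infer_instance
def pvWitness_go2 : Int × List Int := (4, [2, 1, 4, 3])
def Spec_go2 (n : Int) (p : List Int) (out : Int) : Prop := out = go2_alt n p
instance (n : Int) (p : List Int) (out : Int) : Decidable (Spec_go2 n p out) := by unfold Spec_go2; infer_instance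

-- ===== CLAIM (what is proved, stated in full; the proofs are below) =====
def Claim_equal_go2 : Prop := ∀ (n : Int) (p : List Int), Dom_go2 n p → Pre_go2 n p → Spec_go2 n p (go2 n p)

-- ===== LEMMAS AND PROOFS =====
theorem pvFoldDesc {α : Type} (f : α → Int → α) (lo : Int) (Inv : Int → α → Prop)
    (hi : Int) (st : α) (hle : lo ≤ hi) (h0 : Inv hi st)
    (hstep : ∀ a st', lo < a → a ≤ hi → Inv a st' → Inv (a-1) (f st' a)) :
    Inv lo ((PySem.List.pyRange hi lo (-1)).foldl f st) := by
  obtain ⟨k, hk⟩ : ∃ k : Nat, hi = lo + k := ⟨(hi - lo).toNat, by omega⟩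
  subst hk
  induction k generalizing st with
  | zero =>
    rw [PySem.List.pyRange_neg_one_eq_nil (by omega : lo + ((0:Nat):Int) ≤ lo)]
    simpa using h0
  | succ m ih =>
    rw [PySem.List.pyRange_neg_one_cons (by push_cast; omega)]
    simp only [List.foldl_cons]
    have h1 := hstep (lo + ((m+1 : Nat) : Int)) st (by push_cast; omega) le_rfl h0
    have e : lo + ((m+1:Nat) : Int) - 1 = lo + (m : Nat) := by push_cast; ring
    rw [e] at h1
    have e2 : lo + ((m+1:Nat) : Int) - 1 = lo + ((m:Nat) : Int) := e
    have e3 : PySem.List.pyRange (lo + ((m+1:Nat):Int) - 1) lo (-1)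
        = PySem.List.pyRange (lo + ((m:Nat):Int)) lo (-1) := by rw [e2]
    rw [e3]
    exact ih (f st (lo + ((m+1:Nat):Int))) (by omega) h1
      (fun a st' ha hb hinv => hstep a st' ha (by push_cast at hb ⊢; omega) hinv)

theorem pvFoldAsc {α : Type} (f : α → Int → α) (Inv : Int → α → Prop)
    (lo hi : Int) (st : α) (hle : lo ≤ hi) (h0 : Inv lo st)
    (hstep : ∀ a st', lo ≤ a → a < hi → Inv a st' → Inv (a+1) (f st' a)) :
    Inv hi ((PySem.List.pyRange lo hi 1).foldl f st) := by
  obtain ⟨k, hk⟩ : ∃ k : Nat, hi = lo + k := ⟨(hi - lo).toNat, by omega⟩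
  subst hk
  induction k generalizing lo st with
  | zero =>
    rw [PySem.List.pyRange_one_eq_nil (by omega : lo + ((0:Nat):Int) ≤ lo)]
    simpa using h0
  | succ m ih =>
    rw [PySem.List.pyRange_one_cons (by push_cast; omega)]
    simp only [List.foldl_cons]
    have h1 := hstep lo st le_rfl (by push_cast; omega) h0
    have e : lo + ((m+1:Nat) : Int) = (lo + 1) + ((m:Nat):Int) := by push_cast; ring
    rw [e]
    exact ih (lo+1) (f st lo) h1 (by omega)
      (fun a st' ha hb hinv => hstep a st' (by omega) (by push_cast at hb ⊢; omega) hinv)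

def pvS (p : List Int) (N x b : Nat) : Int :=
  ((Finset.Ico x N).filter (fun e => p.getD e 0 < p.getD b 0)).card

def pvL (p : List Int) (b c : Nat) : Int :=
  ((Finset.range b).filter (fun a => p.getD a 0 < p.getD c 0)).card

theorem pvS_nonneg (p : List Int) (N x b : Nat) : 0 ≤ pvS p N x b := Int.natCast_nonneg _

theorem pvS_top (p : List Int) (N x b : Nat) (h : N ≤ x) : pvS p N x b = 0 := by
  unfold pvS
  rw [Finset.Ico_eq_empty (by omega)]
  simp

theorem pvS_cons (p : List Int) (N x b : Nat) (h : x < N) :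
    pvS p N x b = pvS p N (x+1) b + (if p.getD x 0 < p.getD b 0 then 1 else 0) := by
  unfold pvS
  rw [← Finset.insert_Ico_add_one_left_eq_Ico h, Finset.filter_insert]
  split_ifs with hc
  · rw [Finset.card_insert_of_notMem (by simp)]
    push_cast; ring
  · simp

theorem pvL_succ (p : List Int) (t c : Nat) :
    pvL p (t+1) c = pvL p t c + (if p.getD t 0 < p.getD c 0 then 1 else 0) := by
  unfold pvL
  rw [Finset.range_add_one, Finset.filter_insert]
  split_ifs with hc
  · rw [Finset.card_insert_of_notMem (by simp)]
    push_cast; ring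
  · simp

theorem pvL_mul (p : List Int) (b c : Nat) (x : Int) :
    pvL p b c * x = ∑ a ∈ Finset.range b, (if p.getD a 0 < p.getD c 0 then x else 0) := by
  unfold pvL
  rw [Finset.sum_ite, Finset.sum_const, Finset.sum_const_zero, add_zero, nsmul_eq_mul]

theorem pvGetD_toNat {α : Type} (xs : List α) (i : Int) (h : 0 ≤ i) (d : α) :
    PySem.List.pyGetD xs i d = xs.getD i.toNat d := by
  rw [← Int.toNat_of_nonneg h]
  exact PySem.List.pyGetD_natCast xs i.toNat d

theorem pvGetD_set {α : Type} (xs : List α) (i j : Nat) (v d : α) :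
    (xs.set i v).getD j d = if j = i ∧ i < xs.length then v else xs.getD j d := by
  rcases Nat.lt_or_ge i xs.length with hi | hi
  · by_cases hj : j = i
    · subst hj
      simp [List.getD, hi]
    · simp [List.getD, List.getElem?_set_ne (by omega : i ≠ j), hj, hi]
  · rw [List.set_eq_of_length_le (by omega)]
    rw [if_neg (by omega)]


def pvBLeftStep (p : List Int) (b1 : Int) : List Int → Int → List Int := fun L j =>
  if PySem.List.pyGetD p b1 0 < PySem.List.pyGetD p j 0 then
    PySem.List.pySetD L j (PySem.List.pyGetD L j 0 + 1)
  else L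

def pvBInnerStep (p : List Int) (b : Int) (left : List Int) : Int × Int → Int → Int × Int :=
  fun rt c =>
    let right := if PySem.List.pyGetD p (c+1) 0 < PySem.List.pyGetD p b 0 then rt.1 + 1 else rt.1
    (right, rt.2 + PySem.List.pyGetD left c 0 * right)

def pvBOuterStep (n : Int) (p : List Int) : List Int × Int → Int → List Int × Int := fun st b =>
  let left := (PySem.List.pyRange 0 n 1).foldl (pvBLeftStep p (b-1)) st.1
  let inner := (PySem.List.pyRange (n-2) b (-1)).foldl (pvBInnerStep p b left) (0, st.2)
  (left, inner.2)

theorem pvB_left (n : Int) (p : List Int) (b1 : Int) (hb1 : 0 ≤ b1) (left : List Int)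
    (hlen : left.length = n.toNat)
    (hv : ∀ j : Nat, j < n.toNat → left.getD j 0 = pvL p b1.toNat j) :
    ((PySem.List.pyRange 0 n 1).foldl (pvBLeftStep p b1) left).length = n.toNat ∧
    ∀ j : Nat, j < n.toNat →
      ((PySem.List.pyRange 0 n 1).foldl (pvBLeftStep p b1) left).getD j 0 = pvL p (b1.toNat + 1) j := by
  rcases Int.lt_or_le n 0 with hn | hn
  · rw [PySem.List.pyRange_one_eq_nil (by omega)]
    constructor
    · simpa using hlen
    · intro j hj; omega
  · have main := pvFoldAsc (pvBLeftStep p b1)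
      (fun m L => L.length = n.toNat ∧
        ∀ j : Nat, j < n.toNat → L.getD j 0 = if (j : Int) < m then pvL p (b1.toNat + 1) j else pvL p b1.toNat j)
      0 n left hn ⟨hlen, by
        intro j hj
        rw [if_neg (by omega)]
        exact hv j hj⟩ ?_
    · obtain ⟨h1, h2⟩ := main
      refine ⟨h1, fun j hj => ?_⟩
      rw [h2 j hj, if_pos (by omega)]
    · intro a L ha han hinv
      obtain ⟨hL1, hL2⟩ := hinv
      unfold pvBLeftStep
      have hga : PySem.List.pyGetD p a 0 = p.getD a.toNat 0 := pvGetD_toNat p a ha 0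
      have hgb : PySem.List.pyGetD p b1 0 = p.getD b1.toNat 0 := pvGetD_toNat p b1 hb1 0
      split_ifs with hc
      · rw [PySem.List.pySetD_of_nonneg _ _ ha]
        constructor
        · simpa using hL1
        · intro j hj
          rw [pvGetD_set]
          rcases eq_or_ne j a.toNat with hje | hje
          · rw [if_pos ⟨hje, by omega⟩, hje]
            rw [pvGetD_toNat _ _ ha, hL2 a.toNat (by omega), if_neg (by omega), if_pos (by omega)]
            rw [pvL_succ, if_pos (by rwa [hga, hgb] at hc)]
          · rw [if_neg (by tauto), hL2 j hj]
            by_cases hja : (j : Int) < a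
            · rw [if_pos hja, if_pos (by omega)]
            · rw [if_neg hja, if_neg (by omega)]
      · refine ⟨hL1, fun j hj => ?_⟩
        rw [hL2 j hj]
        rcases eq_or_ne j a.toNat with hje | hje
        · subst hje
          rw [if_neg (by omega), if_pos (by omega)]
          rw [pvL_succ, if_neg (by rwa [hga, hgb] at hc), add_zero]
        · by_cases hja : (j : Int) < a
          · rw [if_pos hja, if_pos (by omega)]
          · rw [if_neg hja, if_neg (by omega)]

theorem pvB_inner (n : Int) (p : List Int) (b : Int) (hb : 1 ≤ b) (hbn : b ≤ n - 2)
    (left : List Int) (tot : Int)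
    (hv : ∀ j : Nat, j < n.toNat → left.getD j 0 = pvL p b.toNat j) :
    ((PySem.List.pyRange (n-2) b (-1)).foldl (pvBInnerStep p b left) (0, tot)).2
      = tot + ∑ c ∈ Finset.Ico (b.toNat + 1) (n.toNat - 1), pvL p b.toNat c * pvS p n.toNat (c+1) b.toNat := by
  have hn3 : 3 ≤ n := by omega
  have main := pvFoldDesc (pvBInnerStep p b left) b
    (fun m st => st.1 = pvS p n.toNat (m.toNat + 2) b.toNat ∧
      st.2 = tot + ∑ c ∈ Finset.Ico (m.toNat + 1) (n.toNat - 1), pvL p b.toNat c * pvS p n.toNat (c+1) b.toNat)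
    (n-2) (0, tot) hbn ⟨by rw [pvS_top _ _ _ _ (by omega)], by
      rw [Finset.Ico_eq_empty (by omega), Finset.sum_empty, add_zero]⟩ ?_
  · obtain ⟨h1, h2⟩ := main
    exact h2
  · rintro a ⟨r, acc⟩ ha han ⟨h1, h2⟩
    simp only at h1 h2
    unfold pvBInnerStep
    have hga1 : PySem.List.pyGetD p (a+1) 0 = p.getD (a.toNat + 1) 0 := by
      rw [pvGetD_toNat _ _ (by omega)]
      congr 1
      omega
    have hgb : PySem.List.pyGetD p b 0 = p.getD b.toNat 0 := pvGetD_toNat p b (by omega) 0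
    have hright : (if PySem.List.pyGetD p (a+1) 0 < PySem.List.pyGetD p b 0 then r + 1 else r)
        = pvS p n.toNat (a.toNat + 1) b.toNat := by
      rw [hga1, hgb, h1, pvS_cons p n.toNat (a.toNat + 1) b.toNat (by omega)]
      split_ifs with hc
      · ring
      · ring
    constructor
    · simp only [hright]
      congr 1
      omega
    · simp only [hright, h2]
      rw [pvGetD_toNat _ _ (by omega), hv a.toNat (by omega)]
      have hsplit : Finset.Ico ((a-1).toNat + 1) (n.toNat - 1) = Finset.Ico a.toNat (n.toNat - 1) := by
        congr 1
        omega
    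
      rw [hsplit, Finset.sum_eq_sum_Ico_succ_bot (by omega : a.toNat < n.toNat - 1)]
      ring

theorem pvB_eq (n : Int) (p : List Int) :
    go2_alt n p = ∑ b ∈ Finset.Ico 1 (n.toNat - 1),
      ∑ c ∈ Finset.Ico (b + 1) (n.toNat - 1), pvL p b c * pvS p n.toNat (c+1) b := by
  have hform : go2_alt n p
      = ((PySem.List.pyRange 1 (n-1) 1).foldl (pvBOuterStep n p) (List.replicate n.toNat 0, 0)).2 := rfl
  rcases Int.lt_or_le n 2 with hn | hn
  · rw [hform, PySem.List.pyRange_one_eq_nil (by omega)]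
    simp only [List.foldl_nil]
    rw [Finset.Ico_eq_empty (by omega), Finset.sum_empty]
  · have main := pvFoldAsc (pvBOuterStep n p)
      (fun m st => st.1.length = n.toNat ∧
        (∀ j : Nat, j < n.toNat → st.1.getD j 0 = pvL p (m.toNat - 1) j) ∧
        st.2 = ∑ b ∈ Finset.Ico 1 m.toNat,
          ∑ c ∈ Finset.Ico (b + 1) (n.toNat - 1), pvL p b c * pvS p n.toNat (c+1) b)
      1 (n-1) (List.replicate n.toNat 0, 0) (by omega)
      ⟨by simp, by
        intro j hj
        simp [pvL], by simp⟩ ?_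
    · obtain ⟨h1, h2, h3⟩ := main
      rw [hform, h3]
      congr 1
      congr 1
      omega
    · intro b st hb hbn hinv
      obtain ⟨h1, h2, h3⟩ := hinv
      have hleft := pvB_left n p (b-1) (by omega) st.1 h1 (by
        intro j hj
        rw [h2 j hj]
        congr 2
        omega)
      obtain ⟨hl1, hl2⟩ := hleft
      have hl2' : ∀ j : Nat, j < n.toNat →
          ((PySem.List.pyRange 0 n 1).foldl (pvBLeftStep p (b-1)) st.1).getD j 0 = pvL p b.toNat j := by
        intro j hj
        rw [hl2 j hj]
        congr 2
        omega
      have hinner := pvB_inner n p b (by omega) (by omega)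
        ((PySem.List.pyRange 0 n 1).foldl (pvBLeftStep p (b-1)) st.1) st.2 hl2'
      refine ⟨hl1, ?_, ?_⟩
      · intro j hj
        unfold pvBOuterStep
        simp only
        rw [hl2 j hj]
        congr 2
        omega
      · unfold pvBOuterStep
        simp only
        rw [hinner, h3]
        have he : (b+1).toNat = b.toNat + 1 := by omega
        rw [he, Finset.sum_Ico_succ_top (by omega)]


def pvARowStep (p : List Int) (b : Int) : Int × List Int → Int → Int × List Int := fun st d =>
  let kount := if PySem.List.pyGetD p b 0 > PySem.List.pyGetD p d 0 then st.1 + 1 else st.1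
  (kount, PySem.List.pySetD st.2 d kount)

theorem pvA_row (n : Int) (p : List Int) (b : Nat) (hb : b < n.toNat) :
    (go2Row n p (b : Int)).length = n.toNat ∧
    ∀ x : Nat, (go2Row n p (b : Int)).getD x 0
      = if b < x ∧ x < n.toNat then pvS p n.toNat x b else 0 := by
  have hform : go2Row n p (b : Int)
      = ((PySem.List.pyRange (n-1) (b : Int) (-1)).foldl (pvARowStep p (b : Int))
          (0, List.replicate n.toNat 0)).2 := rfl
  have main := pvFoldDesc (pvARowStep p (b : Int)) (b : Int)
    (fun m st => st.1 = pvS p n.toNat (m.toNat + 1) b ∧ st.2.length = n.toNat ∧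
      ∀ x : Nat, st.2.getD x 0 = if (m : Int) < (x : Int) ∧ x < n.toNat then pvS p n.toNat x b else 0)
    (n-1) (0, List.replicate n.toNat 0) (by omega)
    ⟨by rw [pvS_top _ _ _ _ (by omega)], by simp, by
      intro x
      rw [if_neg (by omega)]
      simp⟩ ?_
  · obtain ⟨h1, h2, h3⟩ := main
    rw [hform]
    refine ⟨h2, fun x => ?_⟩
    rw [h3 x]
    by_cases hx : b < x ∧ x < n.toNat
    · rw [if_pos (by omega), if_pos hx]
    · rw [if_neg (by omega), if_neg hx]
  · intro a st ha han hinv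
    obtain ⟨h1, h2, h3⟩ := hinv
    have hga : PySem.List.pyGetD p a 0 = p.getD a.toNat 0 := pvGetD_toNat p a (by omega) 0
    have hgb : PySem.List.pyGetD p (b : Int) 0 = p.getD b 0 := PySem.List.pyGetD_natCast p b 0
    have heq : pvARowStep p (b : Int) st a
        = ((if p.getD a.toNat 0 < p.getD b 0 then st.1 + 1 else st.1),
           st.2.set a.toNat (if p.getD a.toNat 0 < p.getD b 0 then st.1 + 1 else st.1)) := by
      unfold pvARowStep
      dsimp only
      rw [PySem.List.pySetD_of_nonneg st.2 _ (by omega : (0:Int) ≤ a)]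
      rw [hga, hgb]
    have hkount : (if p.getD a.toNat 0 < p.getD b 0 then st.1 + 1 else st.1)
        = pvS p n.toNat a.toNat b := by
      rw [pvS_cons p n.toNat a.toNat b (by omega), h1]
      split_ifs with hc
      · ring
      · ring
    rw [heq]
    refine ⟨?_, ?_, ?_⟩
    · simp only
      rw [hkount]
      congr 1
      omega
    · simpa using h2
    · intro x
      simp only
      rw [pvGetD_set]
      rcases eq_or_ne x a.toNat with hxe | hxe
      · subst hxe
        rw [if_pos ⟨rfl, by omega⟩, hkount, if_pos (by omega)]
      · rw [if_neg (by tauto), h3 x]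
        by_cases hxc : (a : Int) < (x : Int) ∧ x < n.toNat
        · rw [if_pos hxc, if_pos (by omega)]
        · rw [if_neg hxc, if_neg (by omega)]

def go2V1 (n : Int) (p : List Int) : List (List Int) :=
  (PySem.List.pyRange 0 n 1).map (go2Row n p)

theorem pvV1 (n : Int) (p : List Int) :
    (go2V1 n p).length = n.toNat ∧
    ∀ k : Nat, k < n.toNat → (go2V1 n p).getD k [] = go2Row n p (k : Int) := by
  unfold go2V1
  rw [PySem.List.pyRange_one, List.map_map]
  constructor
  · simp
  · intro k hk
    have hk' : k < n.toNat := hk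
    simp [List.getD, hk']

def pvAAccInner (b : Int) : List (List Int) → Int → List (List Int) := fun v x =>
  PySem.List.pySetD v b
    (PySem.List.pySetD (PySem.List.pyGetD v b [])
      x (PySem.List.pyGetD (PySem.List.pyGetD v b []) x 0
         + PySem.List.pyGetD (PySem.List.pyGetD v (b-1) []) x 0))

def pvAAccStep (n : Int) : List (List Int) → Int → List (List Int) := fun v b =>
  (PySem.List.pyRange 0 n 1).foldl (pvAAccInner b) v


theorem pvA_acc (n : Int) (v : List (List Int)) (r : Nat → Nat → Int)
    (hlen : v.length = n.toNat)
    (hrowlen : ∀ k : Nat, k < n.toNat → (v.getD k []).length = n.toNat)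
    (hval : ∀ k : Nat, k < n.toNat → ∀ x : Nat, (v.getD k []).getD x 0 = r k x)
    (hr0 : ∀ k x : Nat, k < n.toNat → n.toNat ≤ x → r k x = 0) :
    ∀ k : Nat, k < n.toNat → ∀ x : Nat,
      ((go2Acc n v).getD k []).getD x 0 = ∑ i ∈ Finset.range (k+1), r i x := by
  have hform : go2Acc n v = (PySem.List.pyRange 1 n 1).foldl (pvAAccStep n) v := rfl
  rcases Int.lt_or_le n 1 with hn | hn
  · rw [hform, PySem.List.pyRange_one_eq_nil (by omega)]
    intro k hk
    omega
  · have main := pvFoldAsc (pvAAccStep n)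
      (fun m w => w.length = n.toNat ∧ (∀ k : Nat, k < n.toNat → (w.getD k []).length = n.toNat) ∧
        ∀ k : Nat, k < n.toNat → ∀ x : Nat, (w.getD k []).getD x 0
          = if (k : Int) < m then ∑ i ∈ Finset.range (k+1), r i x else r k x)
      1 n v hn
      ⟨hlen, hrowlen, by
        intro k hk x
        rcases Nat.eq_zero_or_pos k with hk0 | hk0
        · subst hk0
          rw [if_pos (by omega), Finset.sum_range_one, hval 0 hk x]
        · rw [if_neg (by omega), hval k hk x]⟩ ?_
    · obtain ⟨h1, h2, h3⟩ := main
      intro k hk x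
      rw [hform, h3 k hk x, if_pos (by omega)]
    · intro b w hb hbn hinv
      -- one outer iteration = the inner fold over x
      have inner := pvFoldAsc (pvAAccInner b)
        (fun j w' => w'.length = n.toNat ∧ (∀ k : Nat, k < n.toNat → (w'.getD k []).length = n.toNat) ∧
          (∀ k : Nat, k < n.toNat → k ≠ b.toNat → ∀ x : Nat, (w'.getD k []).getD x 0
            = if (k : Int) < b then ∑ i ∈ Finset.range (k+1), r i x else r k x) ∧
          ∀ x : Nat, (w'.getD b.toNat []).getD x 0
            = if (x : Int) < j then ∑ i ∈ Finset.range (b.toNat+1), r i x else r b.toNat x)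
        0 n w (by omega)
        ⟨hinv.1, hinv.2.1, by
          intro k hk hkb x
          exact hinv.2.2 k hk x, by
          intro x
          rw [if_neg (by omega), hinv.2.2 b.toNat (by omega) x, if_neg (by omega)]⟩ ?_
      · obtain ⟨g1, g2, g3, g4⟩ := inner
        unfold pvAAccStep
        refine ⟨g1, g2, ?_⟩
        intro k hk x
        rcases eq_or_ne k b.toNat with hkb | hkb
        · subst hkb
          rw [if_pos (by omega), g4 x]
          by_cases hx : (x : Int) < n
          · rw [if_pos hx]
          · rw [if_neg hx]
            rw [hr0 b.toNat x (by omega) (by omega)]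
            rw [Finset.sum_congr rfl (fun i hi => hr0 i x (by
              simp only [Finset.mem_range] at hi
              omega) (by omega))]
            simp
        · rw [g3 k hk hkb x]
          by_cases hkm : (k : Int) < b
          · rw [if_pos hkm, if_pos (by omega)]
          · rw [if_neg hkm, if_neg (by omega)]
      · intro a w' ha han hinv2
        obtain ⟨g1, g2, g3, g4⟩ := hinv2
        have hbN : b.toNat < n.toNat := by omega
        have hgv : PySem.List.pyGetD w' b [] = w'.getD b.toNat [] := pvGetD_toNat w' b (by omega) []
        have hgv1 : PySem.List.pyGetD w' (b-1) [] = w'.getD (b.toNat - 1) [] := by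
          rw [pvGetD_toNat w' (b-1) (by omega) []]
          congr 1
          omega
        have hrowb : PySem.List.pyGetD (PySem.List.pyGetD w' b []) a 0
            = r b.toNat a.toNat := by
          rw [hgv, pvGetD_toNat _ a (by omega) 0, g4 a.toNat, if_neg (by omega)]
        have hrowb1 : PySem.List.pyGetD (PySem.List.pyGetD w' (b-1) []) a 0
            = ∑ i ∈ Finset.range (b.toNat - 1 + 1), r i a.toNat := by
          rw [hgv1, pvGetD_toNat _ a (by omega) 0,
            g3 (b.toNat - 1) (by omega) (by omega) a.toNat, if_pos (by omega)]
        have hsum : r b.toNat a.toNat + (∑ i ∈ Finset.range (b.toNat - 1 + 1), r i a.toNat)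
            = ∑ i ∈ Finset.range (b.toNat + 1), r i a.toNat := by
          have : b.toNat - 1 + 1 = b.toNat := by omega
          rw [this, Finset.sum_range_succ]
          ring
        have heq : pvAAccInner b w' a
            = w'.set b.toNat ((w'.getD b.toNat []).set a.toNat
                (∑ i ∈ Finset.range (b.toNat + 1), r i a.toNat)) := by
          unfold pvAAccInner
          rw [hrowb, hrowb1, hsum, hgv]
          rw [PySem.List.pySetD_of_nonneg _ _ (by omega : (0:Int) ≤ a)]
          rw [PySem.List.pySetD_of_nonneg _ _ (by omega : (0:Int) ≤ b)]
        rw [heq]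
        have hlset : (w'.set b.toNat ((w'.getD b.toNat []).set a.toNat
            (∑ i ∈ Finset.range (b.toNat + 1), r i a.toNat))).length = n.toNat := by
          simpa using g1
        refine ⟨hlset, ?_, ?_, ?_⟩
        · intro k hk
          rw [pvGetD_set]
          split_ifs with hc
          · simpa using g2 b.toNat hbN
          · exact g2 k hk
        · intro k hk hkb x
          rw [pvGetD_set, if_neg (by tauto)]
          exact g3 k hk hkb x
        · intro x
          rw [pvGetD_set, if_pos ⟨rfl, by omega⟩, pvGetD_set]
          rcases eq_or_ne x a.toNat with hxe | hxe
          · subst hxe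
            rw [if_pos ⟨rfl, by rw [g2 b.toNat hbN]; omega⟩, if_pos (by omega)]
          · rw [if_neg (by tauto), g4 x]
            by_cases hxa : (x : Int) < a
            · rw [if_pos hxa, if_pos (by omega)]
            · rw [if_neg hxa, if_neg (by omega)]

def pvR (p : List Int) (N k x : Nat) : Int := if k < x ∧ x < N then pvS p N x k else 0

def go2V (n : Int) (p : List Int) : List (List Int) := go2Acc n (go2V1 n p)

theorem pvA_W (n : Int) (p : List Int) :
    ∀ b : Nat, b < n.toNat → ∀ x : Nat,
      ((go2V n p).getD b []).getD x 0 = ∑ i ∈ Finset.range (b+1), pvR p n.toNat i x := by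
  obtain ⟨hv1len, hv1get⟩ := pvV1 n p
  exact pvA_acc n (go2V1 n p) (pvR p n.toNat) hv1len
    (fun k hk => by rw [hv1get k hk]; exact (pvA_row n p k hk).1)
    (fun k hk x => by rw [hv1get k hk]; exact (pvA_row n p k hk).2 x)
    (fun k x hk hx => by unfold pvR; rw [if_neg (by omega)])


def pvAFinInner (p : List Int) (v : List (List Int)) (a : Int) : Int → Int → Int := fun ret c =>
  if PySem.List.pyGetD p a 0 < PySem.List.pyGetD p c 0 then
    if (PySem.List.pyGetD (PySem.List.pyGetD v (c-1) []) (c+1) 0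
        - PySem.List.pyGetD (PySem.List.pyGetD v a []) (c+1) 0) > 0 then
      ret + (PySem.List.pyGetD (PySem.List.pyGetD v (c-1) []) (c+1) 0
             - PySem.List.pyGetD (PySem.List.pyGetD v a []) (c+1) 0)
    else ret
  else ret

def pvAFinOuter (n : Int) (p : List Int) (v : List (List Int)) : Int → Int → Int := fun ret a =>
  (PySem.List.pyRange (a+2) (n-1) 1).foldl (pvAFinInner p v a) ret

theorem pvA_eq (n : Int) (p : List Int) :
    go2 n p = ∑ a ∈ Finset.range ((n-3).toNat), ∑ c ∈ Finset.Ico (a+2) (n.toNat - 1),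
      (if p.getD a 0 < p.getD c 0 then ∑ k ∈ Finset.Ico (a+1) c, pvS p n.toNat (c+1) k else 0) := by
  have hform : go2 n p
      = (PySem.List.pyRange 0 (n-3) 1).foldl (pvAFinOuter n p (go2V n p)) 0 := rfl
  rcases Int.lt_or_le n 4 with hn | hn
  · rw [hform, PySem.List.pyRange_one_eq_nil (by omega)]
    rw [show (n-3).toNat = 0 by omega]
    simp
  · have hW := pvA_W n p
    have main := pvFoldAsc (pvAFinOuter n p (go2V n p))
      (fun m ret => ret = ∑ a ∈ Finset.range m.toNat, ∑ c ∈ Finset.Ico (a+2) (n.toNat - 1),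
        (if p.getD a 0 < p.getD c 0 then ∑ k ∈ Finset.Ico (a+1) c, pvS p n.toNat (c+1) k else 0))
      0 (n-3) 0 (by omega) (by simp) ?_
    · rw [hform]
      exact main
    · intro a ret ha han hret
      unfold pvAFinOuter
      have inner := pvFoldAsc (pvAFinInner p (go2V n p) a)
        (fun mc r2 => r2 = ret + ∑ c ∈ Finset.Ico (a.toNat + 2) mc.toNat,
          (if p.getD a.toNat 0 < p.getD c 0 then ∑ k ∈ Finset.Ico (a.toNat+1) c, pvS p n.toNat (c+1) k else 0))
        (a+2) (n-1) ret (by omega)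
        (by dsimp only; rw [Finset.Ico_eq_empty (by omega), Finset.sum_empty, add_zero]) ?_
      · dsimp only at inner
        rw [inner, hret]
        rw [show ((n:Int)-1).toNat = n.toNat - 1 by omega]
        rw [show ((a:Int)+1).toNat = a.toNat + 1 by omega]
        rw [Finset.sum_range_succ]
      · intro c r2 hc hcn hr2
        have hga : PySem.List.pyGetD p a 0 = p.getD a.toNat 0 := pvGetD_toNat p a (by omega) 0
        have hgc : PySem.List.pyGetD p c 0 = p.getD c.toNat 0 := pvGetD_toNat p c (by omega) 0
        have hw1 : PySem.List.pyGetD (PySem.List.pyGetD (go2V n p) (c-1) []) (c+1) 0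
            = ∑ i ∈ Finset.range c.toNat, pvR p n.toNat i (c.toNat + 1) := by
          rw [pvGetD_toNat _ (c-1) (by omega) [], pvGetD_toNat _ (c+1) (by omega) 0]
          rw [hW (c-1).toNat (by omega) (c+1).toNat]
          rw [show (c-1).toNat + 1 = c.toNat by omega, show (c+1).toNat = c.toNat + 1 by omega]
        have hw2 : PySem.List.pyGetD (PySem.List.pyGetD (go2V n p) a []) (c+1) 0
            = ∑ i ∈ Finset.range (a.toNat + 1), pvR p n.toNat i (c.toNat + 1) := by
          rw [pvGetD_toNat _ a (by omega) [], pvGetD_toNat _ (c+1) (by omega) 0]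
          rw [hW a.toNat (by omega) (c+1).toNat]
          rw [show (c+1).toNat = c.toNat + 1 by omega]
        have hdelta : PySem.List.pyGetD (PySem.List.pyGetD (go2V n p) (c-1) []) (c+1) 0
            - PySem.List.pyGetD (PySem.List.pyGetD (go2V n p) a []) (c+1) 0
            = ∑ k ∈ Finset.Ico (a.toNat + 1) c.toNat, pvS p n.toNat (c.toNat + 1) k := by
          rw [hw1, hw2, ← Finset.sum_Ico_eq_sub _ (by omega : a.toNat + 1 ≤ c.toNat)]
          refine Finset.sum_congr rfl (fun i hi => ?_)
          simp only [Finset.mem_Ico] at hi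
          unfold pvR
          rw [if_pos ⟨by omega, by omega⟩]
        have hnonneg : 0 ≤ ∑ k ∈ Finset.Ico (a.toNat + 1) c.toNat, pvS p n.toNat (c.toNat + 1) k :=
          Finset.sum_nonneg (fun k _ => pvS_nonneg p n.toNat (c.toNat + 1) k)
        have hstep : pvAFinInner p (go2V n p) a r2 c
            = r2 + (if p.getD a.toNat 0 < p.getD c.toNat 0
                then ∑ k ∈ Finset.Ico (a.toNat+1) c.toNat, pvS p n.toNat (c.toNat+1) k else 0) := by
          unfold pvAFinInner
          rw [hdelta, hga, hgc]
          split_ifs with h1 h2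
          · rfl
          · omega
          · ring
        rw [hstep, hr2]
        rw [show ((c:Int)+1).toNat = c.toNat + 1 by omega]
        rw [Finset.sum_Ico_succ_top (by omega : a.toNat + 2 ≤ c.toNat)]
        ring

def pvG (p : List Int) (N a b c : Nat) : Int :=
  if a < b ∧ b < c then (if p.getD a 0 < p.getD c 0 then pvS p N (c+1) b else 0) else 0

theorem pvKey (p : List Int) (N : Nat) :
    (∑ a ∈ Finset.range (N-3), ∑ c ∈ Finset.Ico (a+2) (N-1),
      (if p.getD a 0 < p.getD c 0 then ∑ k ∈ Finset.Ico (a+1) c, pvS p N (c+1) k else 0))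
    = ∑ b ∈ Finset.Ico 1 (N-1), ∑ c ∈ Finset.Ico (b+1) (N-1), pvL p b c * pvS p N (c+1) b := by
  -- inner conversion, left side
  have hc1 : ∀ a c : Nat, a + 2 ≤ c → c < N - 1 →
      (if p.getD a 0 < p.getD c 0 then ∑ k ∈ Finset.Ico (a+1) c, pvS p N (c+1) k else 0)
      = ∑ b ∈ Finset.range (N-1), pvG p N a b c := by
    intro a c h1 h2
    have e1 : ∑ b ∈ Finset.range (N-1), pvG p N a b c = ∑ b ∈ Finset.Ico (a+1) c, pvG p N a b c := by
      refine (Finset.sum_subset (fun b hb => ?_) (fun b hb hnb => ?_)).symm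
      · simp only [Finset.mem_Ico] at hb
        simp only [Finset.mem_range]
        omega
      · simp only [Finset.mem_Ico] at hnb
        exact if_neg (by omega)
    have e2 : ∑ b ∈ Finset.Ico (a+1) c, pvG p N a b c
        = ∑ b ∈ Finset.Ico (a+1) c, (if p.getD a 0 < p.getD c 0 then pvS p N (c+1) b else 0) :=
      Finset.sum_congr rfl (fun b hb => by
        simp only [Finset.mem_Ico] at hb
        exact if_pos ⟨by omega, by omega⟩)
    rw [e1, e2]
    by_cases hq : p.getD a 0 < p.getD c 0
    · rw [if_pos hq]
      exact Finset.sum_congr rfl (fun b _ => (if_pos hq).symm)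
    · rw [if_neg hq]
      rw [Finset.sum_congr rfl (fun b _ => if_neg hq), Finset.sum_const_zero]
  -- left side to triple sum
  have hLout : (∑ a ∈ Finset.range (N-3), ∑ c ∈ Finset.Ico (a+2) (N-1),
      (if p.getD a 0 < p.getD c 0 then ∑ k ∈ Finset.Ico (a+1) c, pvS p N (c+1) k else 0))
      = ∑ a ∈ Finset.range (N-1), ∑ c ∈ Finset.range (N-1), ∑ b ∈ Finset.range (N-1), pvG p N a b c := by
    have step1 : ∀ a : Nat, (∑ c ∈ Finset.Ico (a+2) (N-1),
        (if p.getD a 0 < p.getD c 0 then ∑ k ∈ Finset.Ico (a+1) c, pvS p N (c+1) k else 0))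
        = ∑ c ∈ Finset.range (N-1), ∑ b ∈ Finset.range (N-1), pvG p N a b c := by
      intro a
      have e3 : (∑ c ∈ Finset.Ico (a+2) (N-1),
          (if p.getD a 0 < p.getD c 0 then ∑ k ∈ Finset.Ico (a+1) c, pvS p N (c+1) k else 0))
          = ∑ c ∈ Finset.Ico (a+2) (N-1), ∑ b ∈ Finset.range (N-1), pvG p N a b c :=
        Finset.sum_congr rfl (fun c hcm => by
          simp only [Finset.mem_Ico] at hcm
          exact hc1 a c hcm.1 hcm.2)
      rw [e3]
      refine Finset.sum_subset (fun c hcm => ?_) (fun c hcm hnc => ?_)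
      · simp only [Finset.mem_Ico] at hcm
        simp only [Finset.mem_range]
        omega
      · simp only [Finset.mem_Ico] at hnc
        simp only [Finset.mem_range] at hcm
        refine Finset.sum_eq_zero (fun b hb => ?_)
        simp only [Finset.mem_range] at hb
        exact if_neg (by omega)
    rw [Finset.sum_congr rfl (fun a _ => step1 a)]
    refine Finset.sum_subset (fun a ha => ?_) (fun a ham hna => ?_)
    · simp only [Finset.mem_range] at ha ⊢
      omega
    · simp only [Finset.mem_range] at ham hna
      refine Finset.sum_eq_zero (fun c hcm => Finset.sum_eq_zero (fun b hb => ?_))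
      simp only [Finset.mem_range] at hcm hb
      exact if_neg (by omega)
  -- right side to triple sum
  have hc2 : ∀ b c : Nat, 1 ≤ b → b + 1 ≤ c → c < N - 1 →
      pvL p b c * pvS p N (c+1) b = ∑ a ∈ Finset.range (N-1), pvG p N a b c := by
    intro b c h1 h2 h3
    rw [pvL_mul]
    have e1 : ∑ a ∈ Finset.range (N-1), pvG p N a b c = ∑ a ∈ Finset.range b, pvG p N a b c := by
      refine (Finset.sum_subset (fun a ha => ?_) (fun a ham hna => ?_)).symm
      · simp only [Finset.mem_range] at ha ⊢
        omega
      · simp only [Finset.mem_range] at ham hna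
        exact if_neg (by omega)
    rw [e1]
    exact Finset.sum_congr rfl (fun a ha => by
      simp only [Finset.mem_range] at ha
      exact (if_pos ⟨by omega, by omega⟩).symm)
  have hRout : (∑ b ∈ Finset.Ico 1 (N-1), ∑ c ∈ Finset.Ico (b+1) (N-1), pvL p b c * pvS p N (c+1) b)
      = ∑ b ∈ Finset.range (N-1), ∑ c ∈ Finset.range (N-1), ∑ a ∈ Finset.range (N-1), pvG p N a b c := by
    have step1 : ∀ b : Nat, 1 ≤ b →
        (∑ c ∈ Finset.Ico (b+1) (N-1), pvL p b c * pvS p N (c+1) b)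
        = ∑ c ∈ Finset.range (N-1), ∑ a ∈ Finset.range (N-1), pvG p N a b c := by
      intro b hb1
      have e3 : (∑ c ∈ Finset.Ico (b+1) (N-1), pvL p b c * pvS p N (c+1) b)
          = ∑ c ∈ Finset.Ico (b+1) (N-1), ∑ a ∈ Finset.range (N-1), pvG p N a b c :=
        Finset.sum_congr rfl (fun c hcm => by
          simp only [Finset.mem_Ico] at hcm
          exact hc2 b c hb1 hcm.1 hcm.2)
      rw [e3]
      refine Finset.sum_subset (fun c hcm => ?_) (fun c hcm hnc => ?_)
      · simp only [Finset.mem_Ico] at hcm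
        simp only [Finset.mem_range]
        omega
      · simp only [Finset.mem_Ico] at hnc
        simp only [Finset.mem_range] at hcm
        refine Finset.sum_eq_zero (fun a ha => ?_)
        simp only [Finset.mem_range] at ha
        exact if_neg (by omega)
    rw [Finset.sum_congr rfl (fun b hbm => step1 b (by
      simp only [Finset.mem_Ico] at hbm
      omega))]
    refine Finset.sum_subset (fun b hb => ?_) (fun b hbm hnb => ?_)
    · simp only [Finset.mem_Ico] at hb
      simp only [Finset.mem_range]
      omega
    · simp only [Finset.mem_Ico] at hnb
      refine Finset.sum_eq_zero (fun c hc => Finset.sum_eq_zero (fun a ha => ?_))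
      simp only [Finset.mem_range] at ha hc
      exact if_neg (by omega)
  rw [hLout, hRout]
  calc ∑ a ∈ Finset.range (N-1), ∑ c ∈ Finset.range (N-1), ∑ b ∈ Finset.range (N-1), pvG p N a b c
      = ∑ a ∈ Finset.range (N-1), ∑ b ∈ Finset.range (N-1), ∑ c ∈ Finset.range (N-1), pvG p N a b c :=
        Finset.sum_congr rfl (fun a _ => Finset.sum_comm)
    _ = ∑ b ∈ Finset.range (N-1), ∑ a ∈ Finset.range (N-1), ∑ c ∈ Finset.range (N-1), pvG p N a b c :=
        Finset.sum_comm
    _ = ∑ b ∈ Finset.range (N-1), ∑ c ∈ Finset.range (N-1), ∑ a ∈ Finset.range (N-1), pvG p N a b c :=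
        Finset.sum_congr rfl (fun b _ => Finset.sum_comm)

theorem pvMain (n : Int) (p : List Int) : go2 n p = go2_alt n p := by
  rw [pvA_eq, pvB_eq]
  rw [show ((n:Int) - 3).toNat = n.toNat - 3 by omega]
  exact pvKey p n.toNat

-- ===== VERDICT (by name: the statement is the Claim_ definition above) =====
theorem go2_spec : Claim_equal_go2 := by
  intro n p _ _
  unfold Spec_go2
  exact pvMain n p
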